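-- pv_equiv track=rewrite | github.com/rfeynman/kids_cal | src/59049.py | compress_line
-- ===== SOURCE A (Python) =====
-- def compress_line(line):
--     new_line = [0] * len(line)
--     moves = []
--     score = 0
--     non_zeros = [i for i, x in enumerate(line) if x != 0]
--
--     insert_pos = 0
--     skip = False
--
--     for i in range(len(non_zeros)):
--         if skip:
--             skip = False
--             continue
--         curr_idx = non_zeros[i]
--         curr_val = line[curr_idx]
--
--         if i + 1 < len(non_zeros) and line[non_zeros[i+1]] == curr_val:
--             next_idx = non_zeros[i+1]
--             merged_val = curr_val * 2
--             new_line[insert_pos] = merged_val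
--             score += (merged_val * curr_val)
--             moves.append({'from_idx': curr_idx, 'to_idx': insert_pos, 'val': curr_val})
--             moves.append({'from_idx': next_idx, 'to_idx': insert_pos, 'val': curr_val})
--             insert_pos += 1
--             skip = True
--         else:
--             new_line[insert_pos] = curr_val
--             moves.append({'from_idx': curr_idx, 'to_idx': insert_pos, 'val': curr_val})
--             insert_pos += 1
--     return new_line, moves, score
-- ===== SOURCE B (Python) =====
-- def compress_line(line):
--     new_line = [0] * len(line)
--     moves = []
--     score = 0
--     insert_pos = 0
--     pending = None  # (index, value) of a tile awaiting a possible merge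
--     for i, x in enumerate(line):
--         if x == 0:
--             continue
--         if pending is None:
--             pending = (i, x)
--         elif pending[1] == x:
--             new_line[insert_pos] = 2 * x
--             score += 2 * x * x
--             moves.append({'from_idx': pending[0], 'to_idx': insert_pos, 'val': x})
--             moves.append({'from_idx': i, 'to_idx': insert_pos, 'val': x})
--             insert_pos += 1
--             pending = None
--         else:
--             new_line[insert_pos] = pending[1]
--             moves.append({'from_idx': pending[0], 'to_idx': insert_pos, 'val': pending[1]})
--             insert_pos += 1
--             pending = (i, x)
--     if pending is not None:
--         new_line[insert_pos] = pending[1]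
--         moves.append({'from_idx': pending[0], 'to_idx': insert_pos, 'val': pending[1]})
--     return new_line, moves, score
-- ===== Notes on version B (the rewrite author's own statement) =====
-- stated objective: simpler
-- what changed: Replaced A's two-phase scan (building a non_zeros index list, then iterating over range(len(non_zeros)) with index-lookahead non_zeros[i+1] and a skip flag) by a single direct pass over enumerate(line) that carries a pending (index, value) tile and merges or flushes it; no index list and no lookahead/skip bookkeeping.
import Mathlib
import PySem

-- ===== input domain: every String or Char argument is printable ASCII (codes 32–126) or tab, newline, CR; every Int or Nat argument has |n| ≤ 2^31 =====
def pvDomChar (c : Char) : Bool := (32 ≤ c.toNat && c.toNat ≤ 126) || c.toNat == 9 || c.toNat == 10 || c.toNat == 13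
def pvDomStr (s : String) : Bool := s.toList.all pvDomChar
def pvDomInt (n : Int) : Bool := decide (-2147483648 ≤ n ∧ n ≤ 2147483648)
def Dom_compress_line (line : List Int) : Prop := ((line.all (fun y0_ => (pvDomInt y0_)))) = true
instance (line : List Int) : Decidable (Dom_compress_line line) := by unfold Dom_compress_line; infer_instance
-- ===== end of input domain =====

-- B replaces A's index-lookahead scan (non_zeros list + skip flag) with a single direct pass
-- carrying a pending tile; same return value, similar cost (objective: alternative/simpler).

-- ===== PORT A =====
-- the dict literal {'from_idx': f, 'to_idx': t, 'val': v} as an association list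
def mvA (f t v : Int) : List (String × Int) := [("from_idx", f), ("to_idx", t), ("val", v)]

-- loop body of A's `for i in range(len(non_zeros))`; state = (new_line, moves, score, insert_pos, skip)
def stepA (line : List Int) (non_zeros : List Int)
    (st : List Int × List (List (String × Int)) × Int × Int × Bool) (i : Int) :
    List Int × List (List (String × Int)) × Int × Int × Bool :=
  let (nl, mvs, sc, pos, skip) := st
  if skip then (nl, mvs, sc, pos, false)
  else
    -- all indexing below is in range (i comes from range(len(non_zeros)), and non_zeros
    -- holds valid indices of line), so the total pyGetD/pySetD forms are exact here
    let curr_idx := PySem.List.pyGetD non_zeros i 0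
    let curr_val := PySem.List.pyGetD line curr_idx 0
    if i + 1 < (non_zeros.length : Int) ∧
        PySem.List.pyGetD line (PySem.List.pyGetD non_zeros (i + 1) 0) 0 = curr_val then
      let next_idx := PySem.List.pyGetD non_zeros (i + 1) 0
      let merged_val := curr_val * 2
      (PySem.List.pySetD nl pos merged_val,
       mvs ++ [mvA curr_idx pos curr_val, mvA next_idx pos curr_val],
       sc + merged_val * curr_val, pos + 1, true)
    else
      (PySem.List.pySetD nl pos curr_val, mvs ++ [mvA curr_idx pos curr_val], sc, pos + 1, false)

def compress_line (line : List Int) : List Int × (List (List (String × Int))) × Int :=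
  let new_line := List.replicate line.length (0 : Int)
  let non_zeros : List Int :=
    ((PySem.List.enumerate line 0).filter (fun p => p.2 != 0)).map (fun p => p.1)
  let st := (PySem.List.pyRange 0 (non_zeros.length : Int) 1).foldl (stepA line non_zeros)
      (new_line, ([] : List (List (String × Int))), (0 : Int), (0 : Int), false)
  (st.1, st.2.1, st.2.2.1)

-- ===== PORT B =====
-- the dict literal {'from_idx': f, 'to_idx': t, 'val': v} as an association list
def mvB (f t v : Int) : List (String × Int) := [("from_idx", f), ("to_idx", t), ("val", v)]

-- loop body of B's single pass; state = (new_line, moves, score, insert_pos, pending)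
def stepB (st : List Int × List (List (String × Int)) × Int × Int × Option (Int × Int))
    (p : Int × Int) :
    List Int × List (List (String × Int)) × Int × Int × Option (Int × Int) :=
  let (nl, mvs, sc, pos, pend) := st
  let (i, x) := p
  if x = 0 then (nl, mvs, sc, pos, pend)
  else
    match pend with
    | none => (nl, mvs, sc, pos, some (i, x))
    | some (pi, pv) =>
      if pv = x then
        (PySem.List.pySetD nl pos (2 * x), mvs ++ [mvB pi pos x, mvB i pos x],
         sc + 2 * x * x, pos + 1, none)
      else
        (PySem.List.pySetD nl pos pv, mvs ++ [mvB pi pos pv], sc, pos + 1, some (i, x))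

def compress_line_alt (line : List Int) : List Int × (List (List (String × Int))) × Int :=
  let st := (PySem.List.enumerate line 0).foldl stepB
      (List.replicate line.length (0 : Int), ([] : List (List (String × Int))),
       (0 : Int), (0 : Int), (none : Option (Int × Int)))
  match st with
  | (nl, mvs, sc, pos, some (pi, pv)) =>
      (PySem.List.pySetD nl pos pv, mvs ++ [mvB pi pos pv], sc)
  | (nl, mvs, sc, _, none) => (nl, mvs, sc)

-- ===== PRECONDITION & SPEC =====
def Spec_compress_line (line : List Int) (out : List Int × (List (List (String × Int))) × Int) : Prop := out = compress_line_alt line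
instance (line : List Int) (out : List Int × (List (List (String × Int))) × Int) : Decidable (Spec_compress_line line out) := by unfold Spec_compress_line; infer_instance

-- ===== CLAIM (what is proved, stated in full; the proofs are below) =====
def Claim_equal_compress_line : Prop := ∀ (line : List Int), Dom_compress_line line → Spec_compress_line line (compress_line line)

-- ===== LEMMAS AND PROOFS =====

-- common residue of both loops on the nonzero (index, value) pairs
def loopS : List (Int × Int) → (List Int × List (List (String × Int)) × Int × Int) →
    List Int × List (List (String × Int)) × Int
  | [], (nl, mvs, sc, _) => (nl, mvs, sc)
  | [(i, v)], (nl, mvs, sc, pos) =>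
      (PySem.List.pySetD nl pos v, mvs ++ [mvA i pos v], sc)
  | (i, v) :: (j, w) :: rest, (nl, mvs, sc, pos) =>
      if w = v then
        loopS rest (PySem.List.pySetD nl pos (v * 2),
          mvs ++ [mvA i pos v, mvA j pos v], sc + v * 2 * v, pos + 1)
      else
        loopS ((j, w) :: rest) (PySem.List.pySetD nl pos v,
          mvs ++ [mvA i pos v], sc, pos + 1)
  termination_by l => l.length
  decreasing_by all_goals (simp only [List.length_cons]; omega)

-- B's trailing flush, as a function of the loop's final state
def flushB (st : List Int × List (List (String × Int)) × Int × Int × Option (Int × Int)) :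
    List Int × List (List (String × Int)) × Int :=
  match st with
  | (nl, mvs, sc, pos, some (pi, pv)) =>
      (PySem.List.pySetD nl pos pv, mvs ++ [mvB pi pos pv], sc)
  | (nl, mvs, sc, _, none) => (nl, mvs, sc)

theorem B_loop (zs : List (Int × Int)) (hz : ∀ p ∈ zs, p.2 ≠ 0) :
    ∀ (pend : Option (Int × Int)) nl mvs sc pos,
    flushB (zs.foldl stepB (nl, mvs, sc, pos, pend)) =
      (match pend with
       | none => loopS zs (nl, mvs, sc, pos)
       | some (pi, pv) => loopS ((pi, pv) :: zs) (nl, mvs, sc, pos)) := by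
  induction zs with
  | nil =>
    intro pend nl mvs sc pos
    cases pend with
    | none => simp [flushB, loopS]
    | some q => obtain ⟨pi, pv⟩ := q; simp [flushB, loopS, mvA, mvB]
  | cons q rest ih =>
    obtain ⟨j, w⟩ := q
    have hw : w ≠ 0 := hz (j, w) (List.mem_cons_self)
    have hz' : ∀ p ∈ rest, p.2 ≠ 0 := fun p hp => hz p (List.mem_cons_of_mem _ hp)
    intro pend nl mvs sc pos
    cases pend with
    | none =>
      simp only [List.foldl_cons, stepB, if_neg hw]
      exact ih hz' (some (j, w)) nl mvs sc pos
    | some q =>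
      obtain ⟨pi, pv⟩ := q
      by_cases hpv : pv = w
      · subst hpv
        simp only [List.foldl_cons, stepB, if_neg hw, if_true]
        rw [ih hz' none]
        have h1 : 2 * pv = pv * 2 := by ring
        rw [h1]
        simp [loopS, mvA, mvB]
      · simp only [List.foldl_cons, stepB, if_neg hw, if_neg hpv]
        rw [ih hz' (some (j, w))]
        simp only [loopS, if_neg (Ne.symm hpv), mvA, mvB]

theorem A_loop (line : List Int) (zs : List (Int × Int))
    (hz : ∀ p ∈ zs, 0 ≤ p.1 ∧ PySem.List.pyGetD line p.1 0 = p.2) :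
    ∀ (m k : Nat), zs.length - k ≤ m → ∀ nl mvs sc pos,
    ((((PySem.List.pyRange (k : Int) (zs.length : Int) 1).foldl
        (stepA line (zs.map (fun p => p.1))) (nl, mvs, sc, pos, false))).1,
     (((PySem.List.pyRange (k : Int) (zs.length : Int) 1).foldl
        (stepA line (zs.map (fun p => p.1))) (nl, mvs, sc, pos, false))).2.1,
     (((PySem.List.pyRange (k : Int) (zs.length : Int) 1).foldl
        (stepA line (zs.map (fun p => p.1))) (nl, mvs, sc, pos, false))).2.2.1) =
      loopS (zs.drop k) (nl, mvs, sc, pos) := by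
  intro m
  induction m with
  | zero =>
    intro k hk nl mvs sc pos
    have hk' : zs.length ≤ k := by omega
    rw [PySem.List.pyRange_one_eq_nil (by exact_mod_cast hk'), List.drop_eq_nil_of_le hk']
    simp [loopS]
  | succ m ihm =>
    intro k hk nl mvs sc pos
    by_cases hkN : zs.length ≤ k
    · rw [PySem.List.pyRange_one_eq_nil (by exact_mod_cast hkN), List.drop_eq_nil_of_le hkN]
      simp [loopS]
    · have hklt : k < zs.length := by omega
      have hidx : ∀ (t : Nat) (ht : t < zs.length),
          PySem.List.pyGetD (zs.map (fun p => p.1)) ((t : Nat) : Int) 0 = zs[t].1 := by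
        intro t ht
        rw [PySem.List.pyGetD_natCast, List.getD_eq_getElem _ _ (by simpa using ht)]
        simp
      have hval : ∀ (t : Nat) (ht : t < zs.length),
          PySem.List.pyGetD line zs[t].1 0 = zs[t].2 := fun t ht =>
        (hz zs[t] (List.getElem_mem ht)).2
      rw [PySem.List.pyRange_one_cons (by exact_mod_cast hklt), List.foldl_cons]
      have hc1 : ((k : Int)) + 1 = (((k + 1 : Nat)) : Int) := by push_cast; ring
      by_cases hnext : k + 1 < zs.length
      · by_cases hveq : zs[k+1].2 = zs[k].2
        · -- merge step
          simp only [stepA, Bool.false_eq_true, if_false, hidx k hklt, hval k hklt, hc1,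
            hidx (k+1) hnext, hval (k+1) hnext, List.length_map]
          rw [if_pos ⟨by exact_mod_cast hnext, hveq⟩]
          rw [PySem.List.pyRange_one_cons (by exact_mod_cast hnext), List.foldl_cons]
          simp only [stepA, if_true]
          have hc2 : (((k + 1 : Nat)) : Int) + 1 = (((k + 2 : Nat)) : Int) := by push_cast; ring
          rw [hc2, ihm (k + 2) (by omega)]
          rw [List.drop_eq_getElem_cons hklt, List.drop_eq_getElem_cons hnext]
          rw [loopS, if_pos hveq]
        · -- adjacent values differ
          simp only [stepA, Bool.false_eq_true, if_false, hidx k hklt, hval k hklt, hc1,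
            hidx (k+1) hnext, hval (k+1) hnext, List.length_map]
          rw [if_neg (fun h => hveq h.2)]
          rw [ihm (k + 1) (by omega)]
          rw [List.drop_eq_getElem_cons hklt, List.drop_eq_getElem_cons hnext]
          rw [loopS, if_neg hveq]
      · -- last nonzero tile
        have hkN1 : zs.length = k + 1 := by omega
        simp only [stepA, Bool.false_eq_true, if_false, hidx k hklt, hval k hklt,
          List.length_map]
        rw [if_neg (fun h => absurd h.1 (by exact_mod_cast (by omega : ¬ ((k:Int) + 1 < (zs.length : Int)))))]
        rw [hc1, ihm (k + 1) (by omega)]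
        rw [List.drop_eq_getElem_cons hklt, List.drop_eq_nil_of_le (by omega)]
        rcases hp : zs[k] with ⟨i, v⟩
        simp [loopS]

theorem stepB_skip_zero (st : List Int × List (List (String × Int)) × Int × Int × Option (Int × Int))
    (p : Int × Int) : stepB st p = if ¬ p.2 = 0 then stepB st p else st := by
  obtain ⟨nl, mvs, sc, pos, pend⟩ := st
  obtain ⟨i, x⟩ := p
  by_cases h : x = 0
  · simp [stepB, h]
  · simp [h]

-- ===== VERDICT (by name: the statement is the Claim_ definition above) =====
theorem compress_line_spec : Claim_equal_compress_line := by
  intro line _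
  show compress_line line = compress_line_alt line
  have hzA : ∀ p ∈ (PySem.List.enumerate line 0).filter (fun p => p.2 != 0),
      0 ≤ p.1 ∧ PySem.List.pyGetD line p.1 0 = p.2 := by
    intro p hp
    have hp' := (List.mem_filter.mp hp).1
    rw [PySem.List.mem_enumerate_iff] at hp'
    obtain ⟨t, ht, rfl⟩ := hp'
    refine ⟨by simp, ?_⟩
    simp only [zero_add, PySem.List.pyGetD_natCast]
    rw [List.getD_eq_getElem _ _ ht]
  have hzB : ∀ p ∈ (PySem.List.enumerate line 0).filter (fun p => p.2 != 0), p.2 ≠ 0 := by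
    intro p hp
    simpa using (List.mem_filter.mp hp).2
  have hA := A_loop line ((PySem.List.enumerate line 0).filter (fun p => p.2 != 0)) hzA
    ((PySem.List.enumerate line 0).filter (fun p => p.2 != 0)).length 0 (by omega)
    (List.replicate line.length 0) [] 0 0
  simp only [Nat.cast_zero, List.drop_zero] at hA
  have hBfold : (PySem.List.enumerate line 0).foldl stepB
      (List.replicate line.length (0 : Int), ([] : List (List (String × Int))),
       (0 : Int), (0 : Int), (none : Option (Int × Int))) =
      ((PySem.List.enumerate line 0).filter (fun p => p.2 != 0)).foldl stepB
      (List.replicate line.length (0 : Int), ([] : List (List (String × Int))),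
       (0 : Int), (0 : Int), (none : Option (Int × Int))) := by
    rw [PySem.List.foldl_congr_mem _ _ _ _ (fun acc x _ => stepB_skip_zero acc x),
      PySem.List.foldl_ite_eq_foldl_filter]
    congr 1
    apply List.filter_congr
    intro x _
    by_cases h : x.2 = 0 <;> simp [h]
  have hB := B_loop ((PySem.List.enumerate line 0).filter (fun p => p.2 != 0)) hzB
    none (List.replicate line.length 0) [] 0 0
  unfold compress_line compress_line_alt
  simp only [List.length_map]
  rw [hA]
  show _ = flushB ((PySem.List.enumerate line 0).foldl stepB
      (List.replicate line.length (0 : Int), ([] : List (List (String × Int))),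
       (0 : Int), (0 : Int), (none : Option (Int × Int))))
  rw [hBfold, hB]
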